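-- pv_equiv track=rewrite | github.com/AxWise-GmbH/axwise-flow | backend/services/processing/persona_formation_v2/fallbacks.py | _collect_quotes
-- ===== SOURCE A (Python) =====
-- from typing import Any, Dict, List, Optional
--
-- def _collect_quotes(transcript: List[Dict[str, Any]]) -> List[str]:
--     quotes: List[str] = []
--     for seg in transcript:
--         try:
--             role = (seg.get("role") or "").strip().lower()
--             if role in {"interviewer", "moderator", "researcher"}:
--                 continue
--             txt = seg.get("dialogue") or seg.get("text") or ""
--             if txt:
--                 quotes.append(str(txt).strip())
--         except Exception:
--             continue
--     # If nothing collected, take anything we have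
--     if not quotes:
--         for seg in transcript:
--             txt = seg.get("dialogue") or seg.get("text") or ""
--             if txt:
--                 quotes.append(str(txt).strip())
--     # Deduplicate while preserving order, limit
--     seen = set()
--     deduped: List[str] = []
--     for q in quotes:
--         if q not in seen:
--             seen.add(q)
--             deduped.append(q)
--     return deduped[:5]
-- ===== SOURCE B (Python) =====
-- from typing import Any, Dict, List, Optional
--
-- def _collect_quotes(transcript: List[Dict[str, Any]]) -> List[str]:
--     # Fused single pass: role-filter, dedup and 5-quote limit maintained together,
--     # with a separate fused fallback pass only when the main pass yields nothing.
--     deduped: List[str] = []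
--     seen = set()
--     for seg in transcript:
--         try:
--             role = (seg.get("role") or "").strip().lower()
--             if role in ("interviewer", "moderator", "researcher"):
--                 continue
--             txt = seg.get("dialogue") or seg.get("text") or ""
--             if txt:
--                 q = str(txt).strip()
--                 if q not in seen:
--                     seen.add(q)
--                     deduped.append(q)
--                     if len(deduped) == 5:
--                         return deduped
--         except Exception:
--             continue
--     if deduped:
--         return deduped
--     for seg in transcript:
--         txt = seg.get("dialogue") or seg.get("text") or ""
--         if txt:
--             q = str(txt).strip()
--             if q not in seen:
--                 seen.add(q)
--                 deduped.append(q)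
--                 if len(deduped) == 5:
--                     break
--     return deduped
-- ===== Notes on version B (the rewrite author's own statement) =====
-- stated objective: alternative
-- what changed: A makes three passes (collect all texts into a list, optionally re-collect in a fallback pass, then a separate dedup-and-slice pass over the whole collected list); B fuses filtering, ordered dedup and the 5-quote limit into one pass with early exit, never materialising the intermediate quotes list, with the fallback as a second fused pass only when the main pass yields nothing.
import Mathlib
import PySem

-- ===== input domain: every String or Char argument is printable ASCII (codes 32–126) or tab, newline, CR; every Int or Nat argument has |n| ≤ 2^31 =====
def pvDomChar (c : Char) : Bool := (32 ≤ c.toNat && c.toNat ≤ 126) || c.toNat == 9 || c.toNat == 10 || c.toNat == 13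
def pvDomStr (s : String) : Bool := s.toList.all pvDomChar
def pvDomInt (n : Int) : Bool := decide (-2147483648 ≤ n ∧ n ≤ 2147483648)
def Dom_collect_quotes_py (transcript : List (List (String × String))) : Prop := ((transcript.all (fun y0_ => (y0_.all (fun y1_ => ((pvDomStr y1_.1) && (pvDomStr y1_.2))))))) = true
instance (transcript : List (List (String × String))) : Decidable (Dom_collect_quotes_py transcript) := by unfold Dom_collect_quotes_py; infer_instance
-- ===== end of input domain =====

-- B fuses A's three passes (collect, fallback collect, dedup-and-slice) into one pass with
-- an early exit at 5 unique quotes (objective: alternative decomposition, same asymptotic cost).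

-- ===== PORT A =====
-- (seg.get("role") or "").strip().lower()
def pvRole (seg : List (String × String)) : String :=
  PySem.Str.lower (PySem.Str.strip (((PySem.Dict.mk seg).get? "role").getD ""))

-- role in {"interviewer", "moderator", "researcher"}
def pvIsInterviewer (seg : List (String × String)) : Bool :=
  pvRole seg == "interviewer" || pvRole seg == "moderator" || pvRole seg == "researcher"

-- seg.get("dialogue") or seg.get("text") or ""   (Python `or`: first truthy string, else "")
def pvTxt (seg : List (String × String)) : String :=
  if ((PySem.Dict.mk seg).get? "dialogue").getD "" ≠ "" then
    ((PySem.Dict.mk seg).get? "dialogue").getD ""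
  else ((PySem.Dict.mk seg).get? "text").getD ""

-- str(txt).strip()  (values are strings on this domain, so str() is the identity)
def pvStrip (seg : List (String × String)) : String := PySem.Str.strip (pvTxt seg)

-- A's dedup loop: seen set + deduped accumulator over the collected quotes
def pvDedupA : List String → PySem.Set String → List String → List String
  | [], _, dd => dd
  | q :: rest, seen, dd =>
    if PySem.Set.contains seen q then pvDedupA rest seen dd
    else pvDedupA rest (PySem.Set.add seen q) (dd ++ [q])

def collect_quotes_py (transcript : List (List (String × String))) : List String :=
  -- main collection loop (the try/except never fires on string-valued segments)
  let quotes := transcript.foldl (fun qs seg =>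
      if pvIsInterviewer seg then qs
      else if pvTxt seg ≠ "" then qs ++ [pvStrip seg]
      else qs) []
  -- if not quotes: take anything we have
  let quotes2 := if quotes = [] then
      transcript.foldl (fun qs seg =>
        if pvTxt seg ≠ "" then qs ++ [pvStrip seg] else qs) []
    else quotes
  -- deduplicate preserving order, then deduped[:5]
  (pvDedupA quotes2 PySem.Set.empty []).take 5

-- ===== PORT B =====
-- fused main loop: role filter + dedup + limit, early return (Bool flag) at 5 unique quotes
def pvBMain : List (List (String × String)) → PySem.Set String → List String →
    (List String × PySem.Set String × Bool)
  | [], seen, acc => (acc, seen, false)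
  | seg :: rest, seen, acc =>
    if pvIsInterviewer seg then pvBMain rest seen acc
    else if pvTxt seg ≠ "" then
      if PySem.Set.contains seen (pvStrip seg) then pvBMain rest seen acc
      else if (acc ++ [pvStrip seg]).length = 5 then
        (acc ++ [pvStrip seg], PySem.Set.add seen (pvStrip seg), true)
      else pvBMain rest (PySem.Set.add seen (pvStrip seg)) (acc ++ [pvStrip seg])
    else pvBMain rest seen acc

-- fused fallback loop (no role filter; `break` at 5 unique quotes)
def pvBFb : List (List (String × String)) → PySem.Set String → List String →
    (List String × PySem.Set String × Bool)
  | [], seen, acc => (acc, seen, false)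
  | seg :: rest, seen, acc =>
    if pvTxt seg ≠ "" then
      if PySem.Set.contains seen (pvStrip seg) then pvBFb rest seen acc
      else if (acc ++ [pvStrip seg]).length = 5 then
        (acc ++ [pvStrip seg], PySem.Set.add seen (pvStrip seg), true)
      else pvBFb rest (PySem.Set.add seen (pvStrip seg)) (acc ++ [pvStrip seg])
    else pvBFb rest seen acc

def collect_quotes_py_alt (transcript : List (List (String × String))) : List String :=
  let r := pvBMain transcript PySem.Set.empty []
  if r.2.2 then r.1
  else if r.1 ≠ [] then r.1
  else (pvBFb transcript r.2.1 r.1).1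

-- ===== PRECONDITION & SPEC =====
def Spec_collect_quotes_py (transcript : List (List (String × String))) (out : List String) : Prop := out = collect_quotes_py_alt transcript
instance (transcript : List (List (String × String))) (out : List String) : Decidable (Spec_collect_quotes_py transcript out) := by unfold Spec_collect_quotes_py; infer_instance

-- ===== CLAIM (what is proved, stated in full; the proofs are below) =====
def Claim_equal_collect_quotes_py : Prop := ∀ (transcript : List (List (String × String))), Dom_collect_quotes_py transcript → Spec_collect_quotes_py transcript (collect_quotes_py transcript)

-- ===== LEMMAS AND PROOFS =====

-- segment predicates: contributes to the main pass / to the fallback pass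
def pvPM (seg : List (String × String)) : Bool := !pvIsInterviewer seg && !(pvTxt seg == "")
def pvPF (seg : List (String × String)) : Bool := !(pvTxt seg == "")

-- the fused dedup-with-limit loop, abstracted to the stream of quote strings
def pvDT : List String → PySem.Set String → List String → (List String × PySem.Set String × Bool)
  | [], seen, acc => (acc, seen, false)
  | q :: rest, seen, acc =>
    if PySem.Set.contains seen q then pvDT rest seen acc
    else if (acc ++ [q]).length = 5 then (acc ++ [q], PySem.Set.add seen q, true)
    else pvDT rest (PySem.Set.add seen q) (acc ++ [q])

lemma foldlM_eq (t : List (List (String × String))) (a : List String) :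
    t.foldl (fun qs seg =>
      if pvIsInterviewer seg then qs
      else if pvTxt seg ≠ "" then qs ++ [pvStrip seg]
      else qs) a = a ++ (t.filter pvPM).map pvStrip := by
  have hf : (fun (qs : List String) seg =>
      if pvIsInterviewer seg then qs
      else if pvTxt seg ≠ "" then qs ++ [pvStrip seg]
      else qs) = (fun (qs : List String) seg =>
      if pvPM seg = true then qs ++ [pvStrip seg] else qs) := by
    funext qs seg
    by_cases h1 : pvIsInterviewer seg <;> by_cases h2 : pvTxt seg = "" <;>
      simp [pvPM, h1, h2]
  rw [hf, PySem.List.foldl_append_if]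

lemma foldlF_eq (t : List (List (String × String))) (a : List String) :
    t.foldl (fun qs seg =>
      if pvTxt seg ≠ "" then qs ++ [pvStrip seg] else qs) a
      = a ++ (t.filter pvPF).map pvStrip := by
  have hf : (fun (qs : List String) seg =>
      if pvTxt seg ≠ "" then qs ++ [pvStrip seg] else qs)
      = (fun (qs : List String) seg =>
      if pvPF seg = true then qs ++ [pvStrip seg] else qs) := by
    funext qs seg
    by_cases h2 : pvTxt seg = "" <;> simp [pvPF, h2]
  rw [hf, PySem.List.foldl_append_if]

lemma bMain_eq_pvDT (t : List (List (String × String))) :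
    ∀ seen acc, pvBMain t seen acc = pvDT ((t.filter pvPM).map pvStrip) seen acc := by
  induction t with
  | nil => intro seen acc; rfl
  | cons seg rest ih =>
    intro seen acc
    by_cases h1 : pvIsInterviewer seg
    · simp [pvBMain, h1, pvPM, ih]
    · by_cases h2 : pvTxt seg = ""
      · simp [pvBMain, h1, h2, pvPM, ih]
      · by_cases h3 : pvStrip seg ∈ seen
        · simp [pvBMain, pvDT, pvPM, h1, h2, h3, ih]
        · by_cases h4 : acc.length = 4 <;>
            simp [pvBMain, pvDT, pvPM, h1, h2, h3, h4, ih]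

lemma bFb_eq_pvDT (t : List (List (String × String))) :
    ∀ seen acc, pvBFb t seen acc = pvDT ((t.filter pvPF).map pvStrip) seen acc := by
  induction t with
  | nil => intro seen acc; rfl
  | cons seg rest ih =>
    intro seen acc
    by_cases h2 : pvTxt seg = ""
    · simp [pvBFb, h2, pvPF, ih]
    · by_cases h3 : pvStrip seg ∈ seen
      · simp [pvBFb, pvDT, pvPF, h2, h3, ih]
      · by_cases h4 : acc.length = 4 <;>
          simp [pvBFb, pvDT, pvPF, h2, h3, h4, ih]

lemma dedupA_suffix (l : List String) :
    ∀ seen acc, ∃ suf, pvDedupA l seen acc = acc ++ suf := by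
  induction l with
  | nil => intro seen acc; exact ⟨[], by simp [pvDedupA]⟩
  | cons q rest ih =>
    intro seen acc
    by_cases h : q ∈ seen
    · obtain ⟨suf, hs⟩ := ih seen acc
      exact ⟨suf, by simp [pvDedupA, h, hs]⟩
    · obtain ⟨suf, hs⟩ := ih (PySem.Set.add seen q) (acc ++ [q])
      simp [PySem.Set.add, h] at hs
      exact ⟨q :: suf, by simp [pvDedupA, h, hs]⟩

lemma pvDT_take (l : List String) :
    ∀ seen acc, acc.length < 5 → (pvDT l seen acc).1 = (pvDedupA l seen acc).take 5 := by
  induction l with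
  | nil =>
    intro seen acc h
    simp [pvDT, pvDedupA, List.take_of_length_le (Nat.le_of_lt h)]
  | cons q rest ih =>
    intro seen acc h
    by_cases h1 : q ∈ seen
    · simp [pvDT, pvDedupA, h1, ih _ _ h]
    · by_cases h4 : acc.length = 4
      · obtain ⟨suf, hs⟩ := dedupA_suffix rest (PySem.Set.add seen q) (acc ++ [q])
        have hlen : (acc ++ [q]).length = 5 := by simp [h4]
        simp [PySem.Set.add, h1] at hs
        have hD : pvDedupA (q :: rest) seen acc = (acc ++ [q]) ++ suf := by
          simp [pvDedupA, h1, hs]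
        have hT : (pvDT (q :: rest) seen acc).1 = acc ++ [q] := by
          simp [pvDT, h1, h4]
        rw [hT, hD, List.take_append, List.take_of_length_le (le_of_eq hlen), hlen]
        simp
      · have h3 : (acc ++ [q]).length < 5 := by simp; omega
        simp [pvDT, pvDedupA, h1, h4, ih _ _ h3]

lemma dedupA_cons_ne_nil (q : String) (l : List String) :
    pvDedupA (q :: l) PySem.Set.empty [] ≠ [] := by
  obtain ⟨suf, hs⟩ := dedupA_suffix l (PySem.Set.add PySem.Set.empty q) [q]
  simp [PySem.Set.add, PySem.Set.empty] at hs
  simp [pvDedupA, PySem.Set.empty, hs]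

-- ===== VERDICT (by name: the statement is the Claim_ definition above) =====
theorem collect_quotes_py_spec : Claim_equal_collect_quotes_py := by
  intro t _
  unfold Spec_collect_quotes_py collect_quotes_py collect_quotes_py_alt
  rw [foldlM_eq, bMain_eq_pvDT]
  simp only [List.nil_append]
  cases hM : (t.filter pvPM).map pvStrip with
  | nil =>
    -- main pass collects nothing: both sides run the fallback pass
    simp only [pvDT, pvDedupA, if_true]
    rw [foldlF_eq, bFb_eq_pvDT, pvDT_take _ _ _ (by simp)]
    simp
  | cons q rest =>
    -- main pass nonempty: A dedups-and-slices it; B's fused loop returns the same list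
    have hne : q :: rest ≠ ([] : List String) := by simp
    have htake : (pvDT (q :: rest) PySem.Set.empty []).1
        = (pvDedupA (q :: rest) PySem.Set.empty []).take 5 :=
      pvDT_take (q :: rest) _ _ (by simp)
    have hnn : (pvDT (q :: rest) PySem.Set.empty []).1 ≠ [] := by
      rw [htake]
      intro hnil
      apply dedupA_cons_ne_nil q rest
      cases hd : pvDedupA (q :: rest) PySem.Set.empty [] with
      | nil => rfl
      | cons x xs => rw [hd] at hnil; simp at hnil
    rw [if_neg hne]
    by_cases hfl : (pvDT (q :: rest) PySem.Set.empty []).2.2 = true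
    · rw [if_pos hfl, htake]
    · rw [if_neg hfl, if_pos hnn, htake]
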